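-- pv_equiv track=rewrite | github.com/AdamZhouSE/Search_Algorithm | p6.py | calculate_attacks_matrix
-- ===== SOURCE A (Python) =====
-- def calculate_attacks_in_pos(queen_pos, row, col):
--     # calculate the number of attacks for a single queen in one position
--     attacks = 0
--     # start from col+1 to make sure attacks are unique
--     for i in range(col + 1, len(queen_pos)):
--         # same row
--         if queen_pos[i] == row:
--             attacks += 1
--         # same diagonal
--         if abs(queen_pos[i] - row) == abs(i - col):
--             attacks += 1
--     return attacks
--
-- def calculate_attacks_matrix(problem):
--     board_size = len(problem)
--     sum_attacks_matrix = [[0] * board_size for _ in range(board_size)]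
--
--     for col in range(board_size):
--         for row in range(board_size):
--             # use the method list() to create a shallow copy so that it will change elements in list problem
--             cur_pos = list(problem)
--             cur_pos[col] = row
--             # count attacks for current queen first
--             sum_attack = calculate_attacks_in_pos(cur_pos, row, col)
--             # sum the rest of queens' attacks, their positions are recorded in cur_pos
--             for i in range(board_size):
--                 if i == col:
--                     continue
--                 sum_attack += calculate_attacks_in_pos(cur_pos, cur_pos[i], i)
--             sum_attacks_matrix[row][col] = sum_attack
--     return sum_attacks_matrix
-- ===== SOURCE B (Python) =====
-- def calculate_attacks_matrix(problem):
--     # O(n^2): count total attacking pairs once; per cell, adjust only column col's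
--     # contribution, read off row/diagonal occupancy dictionaries in O(1).
--     n = len(problem)
--     base = 0
--     for i in range(n):
--         for j in range(i + 1, n):
--             base += (problem[i] == problem[j]) + (abs(problem[i] - problem[j]) == j - i)
--     rows = {}
--     diag_m = {}
--     diag_p = {}
--     for i in range(n):
--         v = problem[i]
--         rows[v] = rows.get(v, 0) + 1
--         diag_m[v - i] = diag_m.get(v - i, 0) + 1
--         diag_p[v + i] = diag_p.get(v + i, 0) + 1
--
--     def contrib(col, row):
--         return (rows.get(row, 0) + diag_m.get(row - col, 0) + diag_p.get(row + col, 0)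
--                 - 3 * (problem[col] == row))
--
--     return [[base - contrib(col, problem[col]) + contrib(col, row)
--              for col in range(n)]
--             for row in range(n)]
-- ===== Notes on version B (the rewrite author's own statement) =====
-- stated objective: faster
-- what changed: Instead of rebuilding the board and recounting every queen's attacks for each of the n^2 cells (O(n^4)), B counts the total attacking pairs once and, per cell, adjusts only the changed column's contribution using row/diagonal occupancy dictionaries in O(1) per cell (O(n^2) overall).
import Mathlib
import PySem

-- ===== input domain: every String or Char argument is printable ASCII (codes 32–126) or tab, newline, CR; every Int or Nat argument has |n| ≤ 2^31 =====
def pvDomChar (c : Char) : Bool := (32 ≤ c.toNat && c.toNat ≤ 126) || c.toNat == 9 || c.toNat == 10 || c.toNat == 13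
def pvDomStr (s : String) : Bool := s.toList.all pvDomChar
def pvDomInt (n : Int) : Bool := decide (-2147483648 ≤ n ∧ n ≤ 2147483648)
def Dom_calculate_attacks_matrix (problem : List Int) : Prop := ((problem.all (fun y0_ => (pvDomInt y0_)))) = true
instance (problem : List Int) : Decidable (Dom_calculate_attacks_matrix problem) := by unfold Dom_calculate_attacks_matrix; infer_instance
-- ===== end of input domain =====

-- B replaces A's recount-the-whole-board-per-cell scheme (O(n^4)) by counting the total
-- attacking pairs once and adjusting, per cell, only the changed column's contribution,
-- read off row/diagonal occupancy dictionaries in O(1) per cell (O(n^2) overall; measured faster).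

-- ===== PORT A =====
def calculate_attacks_in_pos (queen_pos : List Int) (row : Int) (col : Nat) : Int :=
  (List.range' (col + 1) (queen_pos.length - (col + 1))).foldl
    (fun attacks i =>
      let attacks := if queen_pos.getD i 0 = row then attacks + 1 else attacks
      if (queen_pos.getD i 0 - row).natAbs = ((i : Int) - (col : Int)).natAbs
        then attacks + 1 else attacks) 0

def calculate_attacks_matrix (problem : List Int) : List (List Int) :=
  let board_size := problem.length
  let sum_attacks_matrix : List (List Int) :=
    (List.range board_size).map (fun _ => List.replicate board_size 0)
  (List.range board_size).foldl (fun m col =>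
    (List.range board_size).foldl (fun m row =>
      let cur_pos := problem.set col (Int.ofNat row)
      let sum_attack := calculate_attacks_in_pos cur_pos (Int.ofNat row) col
      let sum_attack := (List.range board_size).foldl (fun s i =>
        if i = col then s
        else s + calculate_attacks_in_pos cur_pos (cur_pos.getD i 0) i) sum_attack
      m.set row ((m.getD row []).set col sum_attack)) m) sum_attacks_matrix

-- ===== PORT B =====
def calculate_attacks_matrix_alt (problem : List Int) : List (List Int) :=
  let n := problem.length
  let base : Int := (List.range n).foldl (fun b i =>
      (List.range' (i + 1) (n - (i + 1))).foldl (fun b j =>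
        b + ((if problem.getD i 0 = problem.getD j 0 then 1 else 0)
           + (if ((problem.getD i 0 - problem.getD j 0).natAbs : Int) = (j : Int) - (i : Int)
              then 1 else 0))) b) 0
  let dicts := (List.range n).foldl
    (fun (t : PySem.Dict Int Int × PySem.Dict Int Int × PySem.Dict Int Int) i =>
      let v := problem.getD i 0
      (t.1.insert v (t.1.getD v 0 + 1),
       t.2.1.insert (v - i) (t.2.1.getD (v - i) 0 + 1),
       t.2.2.insert (v + i) (t.2.2.getD (v + i) 0 + 1)))
    (PySem.Dict.empty, PySem.Dict.empty, PySem.Dict.empty)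
  let contrib : Nat → Int → Int := fun col row =>
    dicts.1.getD row 0 + dicts.2.1.getD (row - col) 0 + dicts.2.2.getD (row + col) 0
      - 3 * (if problem.getD col 0 = row then 1 else 0)
  (List.range n).map (fun row =>
    (List.range n).map (fun col =>
      base - contrib col (problem.getD col 0) + contrib col (Int.ofNat row)))

-- ===== PRECONDITION & SPEC =====
def Spec_calculate_attacks_matrix (problem : List Int) (out : List (List Int)) : Prop := out = calculate_attacks_matrix_alt problem
instance (problem : List Int) (out : List (List Int)) : Decidable (Spec_calculate_attacks_matrix problem out) := by unfold Spec_calculate_attacks_matrix; infer_instance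

-- ===== CLAIM (what is proved, stated in full; the proofs are below) =====
def Claim_equal_calculate_attacks_matrix : Prop := ∀ (problem : List Int), Dom_calculate_attacks_matrix problem → Spec_calculate_attacks_matrix problem (calculate_attacks_matrix problem)

-- ===== LEMMAS AND PROOFS =====

-- the per-pair attack indicator (row match + diagonal match)
def pvPair (a : Int) (i : Nat) (b : Int) (j : Nat) : Int :=
  (if a = b then 1 else 0) +
  (if (a - b).natAbs = ((i : Int) - (j : Int)).natAbs then 1 else 0)

-- pair indicator is symmetric
theorem pvPair_comm (a : Int) (i : Nat) (b : Int) (j : Nat) :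
    pvPair a i b j = pvPair b j a i := by
  unfold pvPair; split_ifs <;> omega

-- ∑ over List.range vs Finset.range
theorem pv_sum_range (n : ℕ) (f : ℕ → Int) :
    ((List.range n).map f).sum = ∑ i ∈ Finset.range n, f i := rfl

-- ∑ over List.range' vs Finset.Ico
theorem pv_sum_range' (a b : ℕ) (f : ℕ → Int) :
    ((List.range' a b).map f).sum = ∑ j ∈ Finset.Ico a (a + b), f j := by
  rw [List.range'_eq_map_range, List.map_map, Finset.sum_Ico_eq_sum_range]
  have : a + b - a = b := by omega
  rw [this, ← pv_sum_range]
  rfl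

-- ∑ over filtered List.range vs Finset.erase
theorem pv_sum_filter_ne (n c : ℕ) (f : ℕ → Int) :
    (((List.range n).filter (fun i => i ≠ c)).map f).sum
      = ∑ i ∈ (Finset.range n).erase c, f i := by
  rw [show (Finset.range n).erase c = Finset.filter (fun i => i ≠ c) (Finset.range n) from
    (Finset.filter_ne' (Finset.range n) c).symm]
  rfl

-- foldl accumulating a sum
theorem pv_foldl_add (g : ℕ → Int) (step : Int → ℕ → Int)
    (hstep : ∀ s i, step s i = s + g i) :
    ∀ (l : List ℕ) (s : Int), l.foldl step s = s + (l.map g).sum := by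
  intro l
  induction l with
  | nil => intro s; simp
  | cons x xs ih => intro s; simp [hstep, ih, add_assoc]

-- foldl accumulating a sum while skipping index c
theorem pv_foldl_skip (c : ℕ) (g : ℕ → Int) (step : Int → ℕ → Int)
    (hstep : ∀ s i, step s i = if i = c then s else s + g i) :
    ∀ (l : List ℕ) (s : Int),
      l.foldl step s = s + ((l.filter (fun i => i ≠ c)).map g).sum := by
  intro l
  induction l with
  | nil => intro s; simp
  | cons x xs ih =>
    intro s
    by_cases hx : x = c
    · simp [hstep, hx, ih]
    · simp [hstep, hx, ih, add_assoc]

-- getD after set, different index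
theorem pv_getD_set_ne (q : List Int) (c i : ℕ) (r : Int) (h : i ≠ c) :
    (q.set c r).getD i 0 = q.getD i 0 := by
  simp [List.getD_eq_getElem?_getD, List.getElem?_set_ne (fun hh => h hh.symm)]

-- getD after set, same index
theorem pv_getD_set_self (q : List Int) (c : ℕ) (r : Int) (h : c < q.length) :
    (q.set c r).getD c 0 = r := by
  simp [List.getD_eq_getElem?_getD, List.getElem?_set_self h]

-- fold of length-preserving steps preserves length
theorem pv_foldl_len {α : Type} (step : List α → ℕ → List α)
    (hstep : ∀ m i, (step m i).length = m.length) :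
    ∀ (l : List ℕ) (m : List α), (l.foldl step m).length = m.length := by
  intro l
  induction l with
  | nil => intro m; simp
  | cons x xs ih => intro m; simp [ih, hstep]

-- fold of single-position sets over range k, read back pointwise
theorem pv_fold_set {α : Type} (d : α) (w : α → ℕ → α) (step : List α → ℕ → List α)
    (hstep : ∀ m i, step m i = m.set i (w (m.getD i d) i)) :
    ∀ (k : ℕ) (m : List α) (r : ℕ),
      ((List.range k).foldl step m).getD r d
        = if r < k ∧ r < m.length then w (m.getD r d) r else m.getD r d := by
  intro k
  induction k with
  | zero => intro m r; simp
  | succ k ih =>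
    intro m r
    have hlen : ((List.range k).foldl step m).length = m.length :=
      pv_foldl_len step (fun m i => by rw [hstep]; simp) _ m
    rw [List.range_succ, List.foldl_append, List.foldl_cons, List.foldl_nil, hstep]
    by_cases hr : r = k
    · subst hr
      by_cases hl : r < m.length
      · rw [List.getD_eq_getElem?_getD, List.getElem?_set_self (by omega), Option.getD_some,
          ih m r, if_neg (by omega)]
        rw [if_pos ⟨Nat.lt_succ_self r, hl⟩]
      · rw [List.set_eq_of_length_le (by omega), ih m r, if_neg (by omega), if_neg (by omega)]
    · rw [List.getD_eq_getElem?_getD, List.getElem?_set_ne (fun hh => hr hh.symm),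
        ← List.getD_eq_getElem?_getD, ih m r]
      by_cases h1 : r < k ∧ r < m.length
      · rw [if_pos h1, if_pos ⟨by omega, h1.2⟩]
      · rw [if_neg h1, if_neg (by omega)]

-- canonical sums used by the equivalence argument
def pvPn (q : List Int) (i j : ℕ) : Int := pvPair (q.getD i 0) i (q.getD j 0) j

def pvC (q : List Int) (n c : ℕ) (r : Int) : Int :=
  ∑ i ∈ (Finset.range n).erase c, pvPair (q.getD i 0) i r c

def pvT (q : List Int) (n : ℕ) : Int :=
  ∑ i ∈ Finset.range n, ∑ j ∈ Finset.Ico (i + 1) n, pvPn q i j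

def pvN (q : List Int) (n c : ℕ) : Int :=
  ∑ i ∈ (Finset.range n).erase c, ∑ j ∈ (Finset.Ico (i + 1) n).erase c, pvPn q i j

theorem pvPn_comm (q : List Int) (i j : ℕ) : pvPn q i j = pvPn q j i := pvPair_comm _ _ _ _

-- splitting the total into pairs avoiding c and pairs involving c
theorem pvT_split (q : List Int) (n c : ℕ) (hc : c < n) :
    pvT q n = pvN q n c + pvC q n c (q.getD c 0) := by
  have hmem : c ∈ Finset.range n := Finset.mem_range.mpr hc
  have hsplit : ∀ i ∈ (Finset.range n).erase c,
      ∑ j ∈ Finset.Ico (i + 1) n, pvPn q i j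
        = (if i < c then pvPn q i c else 0)
          + ∑ j ∈ (Finset.Ico (i + 1) n).erase c, pvPn q i j := by
    intro i hi
    have hic : i ≠ c := Finset.ne_of_mem_erase hi
    by_cases h : i < c
    · rw [if_pos h, ← Finset.add_sum_erase _ _ (Finset.mem_Ico.mpr ⟨by omega, hc⟩)]
    · rw [if_neg h, Finset.erase_eq_self.mpr (by simp only [Finset.mem_Ico]; omega), zero_add]
  have hC : pvC q n c (q.getD c 0)
      = (∑ i ∈ (Finset.range n).erase c, (if i < c then pvPn q i c else 0))
        + ∑ j ∈ Finset.Ico (c + 1) n, pvPn q c j := by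
    unfold pvC
    have h1 : ∀ i ∈ (Finset.range n).erase c,
        pvPair (q.getD i 0) i (q.getD c 0) c
          = (if i < c then pvPn q i c else 0) + (if c < i then pvPn q i c else 0) := by
      intro i hi
      have hic : i ≠ c := Finset.ne_of_mem_erase hi
      by_cases h : i < c
      · rw [if_pos h, if_neg (by omega), add_zero]; rfl
      · rw [if_neg h, if_pos (by omega), zero_add]; rfl
    rw [Finset.sum_congr rfl h1, Finset.sum_add_distrib]
    congr 1
    rw [← Finset.sum_filter]
    have h2 : ((Finset.range n).erase c).filter (fun i => c < i) = Finset.Ico (c + 1) n := by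
      ext i
      simp only [Finset.mem_filter, Finset.mem_erase, Finset.mem_range, Finset.mem_Ico]
      omega
    rw [h2]
    exact Finset.sum_congr rfl (fun j _ => pvPn_comm q j c)
  calc pvT q n
      = (∑ j ∈ Finset.Ico (c + 1) n, pvPn q c j)
        + ∑ i ∈ (Finset.range n).erase c, ∑ j ∈ Finset.Ico (i + 1) n, pvPn q i j :=
        (Finset.add_sum_erase _ _ hmem).symm
    _ = (∑ j ∈ Finset.Ico (c + 1) n, pvPn q c j)
        + ((∑ i ∈ (Finset.range n).erase c, (if i < c then pvPn q i c else 0)) + pvN q n c) := by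
        rw [Finset.sum_congr rfl hsplit, Finset.sum_add_distrib]; rfl
    _ = pvN q n c + pvC q n c (q.getD c 0) := by rw [hC]; ring

theorem pvN_set (q : List Int) (n c : ℕ) (r : Int) :
    pvN (q.set c r) n c = pvN q n c := by
  unfold pvN
  refine Finset.sum_congr rfl (fun i hi => Finset.sum_congr rfl (fun j hj => ?_))
  unfold pvPn
  rw [pv_getD_set_ne _ _ _ _ (Finset.ne_of_mem_erase hi),
    pv_getD_set_ne _ _ _ _ (Finset.ne_of_mem_erase hj)]

theorem pvC_set (q : List Int) (n c : ℕ) (r r' : Int) :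
    pvC (q.set c r) n c r' = pvC q n c r' := by
  unfold pvC
  refine Finset.sum_congr rfl (fun i hi => ?_)
  rw [pv_getD_set_ne _ _ _ _ (Finset.ne_of_mem_erase hi)]

-- the value A writes into cell (row, col)
def pvE (p : List Int) (row col : ℕ) : Int :=
  let cur := p.set col (Int.ofNat row)
  (List.range p.length).foldl
    (fun s i => if i = col then s
      else s + calculate_attacks_in_pos cur (cur.getD i 0) i)
    (calculate_attacks_in_pos cur (Int.ofNat row) col)

-- calculate_attacks_in_pos as a Finset sum
theorem pv_attacks_eq (q : List Int) (r : Int) (c : ℕ) (hc : c < q.length) :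
    calculate_attacks_in_pos q r c
      = ∑ j ∈ Finset.Ico (c + 1) q.length, pvPair (q.getD j 0) j r c := by
  unfold calculate_attacks_in_pos
  rw [pv_foldl_add (fun j => pvPair (q.getD j 0) j r c) _
    (fun s i => by dsimp only [pvPair]; split_ifs <;> omega)]
  rw [pv_sum_range']
  rw [show c + 1 + (q.length - (c + 1)) = q.length by omega]
  simp

-- A's cell value equals the total pair count of the modified board
theorem pvE_eq_T (p : List Int) (row col : ℕ) (hc : col < p.length) :
    pvE p row col = pvT (p.set col (Int.ofNat row)) p.length := by
  unfold pvE
  dsimp only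
  set q := p.set col (Int.ofNat row) with hq
  have hlen : q.length = p.length := by rw [hq]; exact List.length_set ..
  have hattack : ∀ i, i < p.length →
      calculate_attacks_in_pos q (q.getD i 0) i
        = ∑ j ∈ Finset.Ico (i + 1) p.length, pvPn q i j := by
    intro i hi
    rw [pv_attacks_eq q _ i (by omega), hlen]
    exact Finset.sum_congr rfl (fun j _ => pvPn_comm q j i)
  rw [pv_foldl_skip col (fun i => calculate_attacks_in_pos q (q.getD i 0) i) _
    (fun s i => rfl), pv_sum_filter_ne]
  have hs0 : calculate_attacks_in_pos q (Int.ofNat row) col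
      = ∑ j ∈ Finset.Ico (col + 1) p.length, pvPn q col j := by
    rw [show (Int.ofNat row) = q.getD col 0 from (pv_getD_set_self p col _ hc).symm]
    exact hattack col hc
  rw [hs0, show (∑ i ∈ (Finset.range p.length).erase col,
      calculate_attacks_in_pos q (q.getD i 0) i)
      = ∑ i ∈ (Finset.range p.length).erase col, ∑ j ∈ Finset.Ico (i + 1) p.length, pvPn q i j
    from Finset.sum_congr rfl (fun i hi =>
      hattack i (Finset.mem_range.mp (Finset.mem_of_mem_erase hi)))]
  unfold pvT
  exact Finset.add_sum_erase (Finset.range p.length)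
    (fun i => ∑ j ∈ Finset.Ico (i + 1) p.length, pvPn q i j) (Finset.mem_range.mpr hc)

-- the delta identity: total of modified board from total of original
theorem pvT_delta (p : List Int) (col : ℕ) (r : Int) (hc : col < p.length) :
    pvT (p.set col r) p.length
      = pvT p p.length - pvC p p.length col (p.getD col 0) + pvC p p.length col r := by
  have h1 := pvT_split (p.set col r) p.length col hc
  have h2 := pvT_split p p.length col hc
  rw [pvN_set, pvC_set, pv_getD_set_self _ _ _ hc] at h1
  omega

-- fold of per-index writes over range n starting from zeros is a map
theorem pv_rowfold (n : ℕ) (f : ℕ → Int) :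
    (List.range n).foldl (fun l c => l.set c (f c)) (List.replicate n (0 : Int))
      = (List.range n).map f := by
  have hlen : ((List.range n).foldl (fun l c => l.set c (f c))
      (List.replicate n (0 : Int))).length = n := by
    rw [pv_foldl_len _ (fun l c => by simp)]; simp
  apply List.ext_getElem (by simp [hlen])
  intro i h1 h2
  have hfs := pv_fold_set (0 : Int) (fun _ c => f c) _ (fun l c => rfl) n
    (List.replicate n (0 : Int)) i
  rw [if_pos ⟨by omega, by simp; omega⟩] at hfs
  rw [← List.getD_eq_getElem _ 0 h1, hfs]
  simp

-- outer fold characterised row by row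
theorem pv_outer (n : ℕ) (E : ℕ → ℕ → Int) (step2 : List (List Int) → ℕ → List (List Int))
    (hstep2 : ∀ m col, step2 m col
      = (List.range n).foldl (fun m row => m.set row ((m.getD row []).set col (E row col))) m) :
    ∀ (K : ℕ) (m : List (List Int)) (r : ℕ), r < n → r < m.length →
      ((List.range K).foldl step2 m).getD r []
        = (List.range K).foldl (fun l c => l.set c (E r c)) (m.getD r []) := by
  intro K
  induction K with
  | zero => intro m r _ _; simp
  | succ K ih =>
    intro m r hrn hrm
    have hlenM : ((List.range K).foldl step2 m).length = m.length :=
      pv_foldl_len _ (fun m col => by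
        rw [hstep2]; exact pv_foldl_len _ (fun m row => by simp) _ _) _ _
    rw [List.range_succ, List.foldl_append, List.foldl_cons, List.foldl_nil, hstep2]
    rw [pv_fold_set ([] : List Int) (fun l row => l.set K (E row K)) _ (fun m row => rfl) n _ r]
    rw [if_pos ⟨hrn, by omega⟩, ih m r hrn hrm]
    rw [List.foldl_append, List.foldl_cons, List.foldl_nil]

-- A's matrix in closed form
theorem pv_A_shape (p : List Int) :
    calculate_attacks_matrix p
      = (List.range p.length).map (fun row =>
          (List.range p.length).map (fun col => pvE p row col)) := by
  unfold calculate_attacks_matrix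
  dsimp only
  apply List.ext_getElem (by
    rw [pv_foldl_len _ (fun m col => pv_foldl_len _ (fun m row => by simp) _ _)]
    simp)
  intro r h1 h2
  have hr : r < p.length := by simpa using h2
  rw [← List.getD_eq_getElem _ ([] : List Int) h1]
  rw [pv_outer p.length (pvE p)
    (fun m col => List.foldl (fun m row =>
        m.set row ((m.getD row []).set col
          (List.foldl (fun s i =>
              if i = col then s
              else s + calculate_attacks_in_pos (p.set col (Int.ofNat row))
                ((p.set col (Int.ofNat row)).getD i 0) i)
            (calculate_attacks_in_pos (p.set col (Int.ofNat row)) (Int.ofNat row) col)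
            (List.range p.length)))) m (List.range p.length))
    (fun m col => rfl) p.length _ r hr (by simpa using hr)]
  have hm0 : ((List.range p.length).map
      (fun _ => List.replicate p.length (0 : Int))).getD r [] = List.replicate p.length 0 := by
    rw [List.getD_eq_getElem _ ([] : List Int) (by simpa using hr)]
    simp
  rw [hm0, pv_rowfold]
  simp

-- B's matrix in closed form
-- a triple fold splits componentwise
theorem pv_fold3 {D : Type} (f1 f2 f3 : D → ℕ → D) (step : D × D × D → ℕ → D × D × D)
    (hstep : ∀ t i, step t i = (f1 t.1 i, f2 t.2.1 i, f3 t.2.2 i)) :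
    ∀ (l : List ℕ) (a b c : D),
      l.foldl step (a, b, c) = (l.foldl f1 a, l.foldl f2 b, l.foldl f3 c) := by
  intro l
  induction l with
  | nil => intro a b c; simp
  | cons x xs ih => intro a b c; rw [List.foldl_cons, hstep, List.foldl_cons,
      List.foldl_cons, List.foldl_cons]; exact ih _ _ _

-- occupancy lookup of a fold-built counter as an indicator sum
theorem pv_getD_rangefold (n : ℕ) (g : ℕ → Int) (v : Int) :
    ((List.range n).foldl (fun (d : PySem.Dict Int Int) i =>
        d.insert (g i) (d.getD (g i) 0 + 1)) PySem.Dict.empty).getD v 0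
      = ∑ i ∈ Finset.range n, (if g i = v then (1 : Int) else 0) := by
  have h1 : (List.range n).foldl (fun (d : PySem.Dict Int Int) i =>
      d.insert (g i) (d.getD (g i) 0 + 1)) PySem.Dict.empty
      = ((List.range n).map g).foldl (fun (d : PySem.Dict Int Int) x =>
          d.insert x (d.getD x 0 + 1)) PySem.Dict.empty :=
    (List.foldl_map (f := g) (g := fun (d : PySem.Dict Int Int) x => d.insert x (d.getD x 0 + 1))
      (l := List.range n) (init := PySem.Dict.empty)).symm
  have hcnt : ∀ m : ℕ, ((((List.range m).map g).count v : ℕ) : Int)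
      = ∑ i ∈ Finset.range m, (if g i = v then (1 : Int) else 0) := by
    intro m
    induction m with
    | zero => simp
    | succ k ih =>
      rw [List.range_succ, List.map_append, List.count_append, Finset.sum_range_succ, ← ih]
      push_cast
      by_cases h : g k = v <;> simp [h]
  rw [h1, PySem.Dict.getD_foldl_insert_add_one,
    show (PySem.Dict.empty : PySem.Dict Int Int).getD v 0 = 0 from by simp, zero_add, hcnt]

-- pvC expressed through global row/diagonal occupancy counts
theorem pvC_counts (p : List Int) (n c : ℕ) (hc : c < n) (r : Int) :
    pvC p n c r
      = (∑ i ∈ Finset.range n, (if p.getD i 0 = r then (1 : Int) else 0))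
        + (∑ i ∈ Finset.range n, (if p.getD i 0 - i = r - c then (1 : Int) else 0))
        + (∑ i ∈ Finset.range n, (if p.getD i 0 + i = r + c then (1 : Int) else 0))
        - 3 * (if p.getD c 0 = r then 1 else 0) := by
  have hmem : c ∈ Finset.range n := Finset.mem_range.mpr hc
  have hsum : ∑ i ∈ Finset.range n, pvPair (p.getD i 0) i r c
      = pvPair (p.getD c 0) c r c + pvC p n c r :=
    (Finset.add_sum_erase _ (fun i => pvPair (p.getD i 0) i r c) hmem).symm
  have hpt : ∀ i ∈ Finset.range n,
      pvPair (p.getD i 0) i r c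
        = (if p.getD i 0 = r then (1 : Int) else 0)
          + ((if p.getD i 0 - i = r - c then (1 : Int) else 0)
            + (if p.getD i 0 + i = r + c then (1 : Int) else 0)
            - (if i = c then (if p.getD i 0 = r then (1 : Int) else 0) else 0)) := by
    intro i _
    unfold pvPair
    split_ifs <;> omega
  have hfull : ∑ i ∈ Finset.range n, pvPair (p.getD i 0) i r c
      = (∑ i ∈ Finset.range n, (if p.getD i 0 = r then (1 : Int) else 0))
        + ((∑ i ∈ Finset.range n, (if p.getD i 0 - i = r - c then (1 : Int) else 0))
          + (∑ i ∈ Finset.range n, (if p.getD i 0 + i = r + c then (1 : Int) else 0))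
          - (if p.getD c 0 = r then (1 : Int) else 0)) := by
    rw [Finset.sum_congr rfl hpt, Finset.sum_add_distrib]
    congr 1
    rw [Finset.sum_sub_distrib, Finset.sum_add_distrib]
    congr 1
    rw [Finset.sum_ite_eq' (Finset.range n) c
      (fun i => if p.getD i 0 = r then (1 : Int) else 0), if_pos hmem]
  have hself : pvPair (p.getD c 0) c r c = 2 * (if p.getD c 0 = r then (1 : Int) else 0) := by
    unfold pvPair
    split_ifs <;> omega
  rw [hfull, hself] at hsum
  omega

theorem pv_B_shape (p : List Int) :
    calculate_attacks_matrix_alt p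
      = (List.range p.length).map (fun row =>
          (List.range p.length).map (fun col =>
            pvT p p.length - pvC p p.length col (p.getD col 0)
              + pvC p p.length col (Int.ofNat row))) := by
  unfold calculate_attacks_matrix_alt
  dsimp only
  refine List.map_congr_left fun row hrow => List.map_congr_left fun col hcol => ?_
  rw [List.mem_range] at hrow hcol
  rw [pv_fold3 (fun (d : PySem.Dict Int Int) i => d.insert (p.getD i 0) (d.getD (p.getD i 0) 0 + 1))
    (fun (d : PySem.Dict Int Int) i => d.insert (p.getD i 0 - (i : Int)) (d.getD (p.getD i 0 - (i : Int)) 0 + 1))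
    (fun (d : PySem.Dict Int Int) i => d.insert (p.getD i 0 + (i : Int)) (d.getD (p.getD i 0 + (i : Int)) 0 + 1))
    _ (fun t i => rfl) (List.range p.length) _ _ _]
  dsimp only
  rw [pv_getD_rangefold p.length (fun i => p.getD i 0) (p.getD col 0),
    pv_getD_rangefold p.length (fun i => p.getD i 0 - (i : Int)) (p.getD col 0 - (col : Int)),
    pv_getD_rangefold p.length (fun i => p.getD i 0 + (i : Int)) (p.getD col 0 + (col : Int)),
    pv_getD_rangefold p.length (fun i => p.getD i 0) (Int.ofNat row),
    pv_getD_rangefold p.length (fun i => p.getD i 0 - (i : Int)) (Int.ofNat row - (col : Int)),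
    pv_getD_rangefold p.length (fun i => p.getD i 0 + (i : Int)) (Int.ofNat row + (col : Int))]
  have hbase : (List.range p.length).foldl (fun b i =>
      (List.range' (i + 1) (p.length - (i + 1))).foldl (fun b j =>
        b + ((if p.getD i 0 = p.getD j 0 then (1 : Int) else 0)
           + (if ((p.getD i 0 - p.getD j 0).natAbs : Int) = (j : Int) - (i : Int)
              then 1 else 0))) b) 0 = pvT p p.length := by
    rw [pv_foldl_add (fun i => ((List.range' (i + 1) (p.length - (i + 1))).map (fun j =>
        (if p.getD i 0 = p.getD j 0 then (1 : Int) else 0)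
          + (if ((p.getD i 0 - p.getD j 0).natAbs : Int) = (j : Int) - (i : Int)
             then 1 else 0))).sum) _
      (fun s i => pv_foldl_add _ _ (fun s j => rfl) _ s), zero_add, pv_sum_range]
    unfold pvT
    refine Finset.sum_congr rfl (fun i hi => ?_)
    rw [pv_sum_range', show i + 1 + (p.length - (i + 1)) = p.length from by
      have := Finset.mem_range.mp hi; omega]
    refine Finset.sum_congr rfl (fun j hj => ?_)
    have hij : i < j := by have := (Finset.mem_Ico.mp hj).1; omega
    unfold pvPn pvPair
    split_ifs <;> omega
  rw [hbase, pvC_counts p p.length col hcol (p.getD col 0),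
    pvC_counts p p.length col hcol (Int.ofNat row)]

-- ===== VERDICT (by name: the statement is the Claim_ definition above) =====
theorem calculate_attacks_matrix_spec : Claim_equal_calculate_attacks_matrix := by
  intro p _
  unfold Spec_calculate_attacks_matrix
  rw [pv_A_shape, pv_B_shape]
  refine List.map_congr_left (fun row hrow => List.map_congr_left (fun col hcol => ?_))
  rw [List.mem_range] at hrow hcol
  rw [pvE_eq_T p row col hcol, pvT_delta p col (Int.ofNat row) hcol]
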